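-- pv_equiv track=rewrite | github.com/abdalftahhadeel3-eng/ask-samra | ask_samra1.py | search_answer
-- ===== SOURCE A (Python) =====
-- def search_answer(question, sentences, synonyms):
--     question_lower = question.lower()
--     best_match = ""
--     max_count = 0
--
--     for sentence in sentences:
--         count = 0
--         for key, words in synonyms.items():
--             for word in words:
--                 if word.lower() in sentence.lower() and word.lower() in question_lower:
--                     count += 1
--         # نزيد التقييم حسب تطابق كلمات السؤال العادية
--         for word in question_lower.split():
--             if word in sentence.lower():
--                 count += 1
--         if count > max_count:
--             max_count = count
--             best_match = sentence
--
--     return best_match.strip() if max_count > 0 else None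
-- ===== SOURCE B (Python) =====
-- def search_answer(question, sentences, synonyms):
--     ql = question.lower()
--     lows = [s.lower() for s in sentences]
--     scores = [0] * len(sentences)
--     # word-major pass: every question-relevant synonym word bumps every sentence containing it
--     for words in synonyms.values():
--         for w in words:
--             wl = w.lower()
--             if wl in ql:
--                 for i in range(len(lows)):
--                     if wl in lows[i]:
--                         scores[i] += 1
--     for w in ql.split():
--         for i in range(len(lows)):
--             if w in lows[i]:
--                 scores[i] += 1
--     if not scores:
--         return None
--     m = max(scores)
--     return sentences[scores.index(m)].strip() if m > 0 else None
-- ===== Notes on version B (the rewrite author's own statement) =====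
-- stated objective: faster
-- what changed: B inverts the loop nest: it builds a per-sentence score table word-major (each question-relevant synonym word and each question word bumps every sentence containing it), then picks the answer in a separate max/first-index stage, instead of A's sentence-major nested re-scan with a running best.
import Mathlib
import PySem

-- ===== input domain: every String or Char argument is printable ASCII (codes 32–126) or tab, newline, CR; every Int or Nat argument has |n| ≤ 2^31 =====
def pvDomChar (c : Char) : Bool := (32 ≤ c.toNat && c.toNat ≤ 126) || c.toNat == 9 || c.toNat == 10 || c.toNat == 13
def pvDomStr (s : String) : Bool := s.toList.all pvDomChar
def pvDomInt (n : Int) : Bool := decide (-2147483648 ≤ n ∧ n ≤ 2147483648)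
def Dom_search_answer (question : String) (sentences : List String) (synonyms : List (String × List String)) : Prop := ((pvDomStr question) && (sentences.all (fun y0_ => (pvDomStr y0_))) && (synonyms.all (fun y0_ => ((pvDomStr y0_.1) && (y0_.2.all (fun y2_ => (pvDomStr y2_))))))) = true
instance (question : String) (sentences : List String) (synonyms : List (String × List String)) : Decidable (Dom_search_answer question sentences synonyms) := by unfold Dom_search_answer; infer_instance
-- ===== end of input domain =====

-- B builds a per-sentence score table word-major (each question-relevant word bumps every sentence
-- containing it) and selects by max + first index, instead of A's sentence-major nested rescans.

-- ===== PORT A =====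
-- per-sentence score: A's nested synonyms loops, then the question-word loop
def countA (ql : String) (synonyms : List (String × List String)) (sentence : String) : Nat :=
  let c : Nat := synonyms.foldl (fun c kv =>
    kv.2.foldl (fun c word =>
      if PySem.Str.isIn (PySem.Str.lower word) (PySem.Str.lower sentence)
          && PySem.Str.isIn (PySem.Str.lower word) ql
      then c + 1 else c) c) 0
  (PySem.Str.split₀ ql).foldl (fun c word =>
    if PySem.Str.isIn word (PySem.Str.lower sentence) then c + 1 else c) c

def bestA (question : String) (synonyms : List (String × List String)) (sentences : List String) : String × Nat :=
  sentences.foldl (fun (st : String × Nat) sentence =>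
    if countA (PySem.Str.lower question) synonyms sentence > st.2
    then (sentence, countA (PySem.Str.lower question) synonyms sentence) else st) ("", 0)

def search_answer (question : String) (sentences : List String) (synonyms : List (String × List String)) : Option String :=
  if (bestA question synonyms sentences).2 > 0
  then some (PySem.Str.strip (bestA question synonyms sentences).1) else none

-- ===== PORT B =====
-- 'for i in range(len(lows)): if wl in lows[i]: scores[i] += 1' — a pointwise pass over the score table
def bump (wl : String) (lows : List String) (scores : List Nat) : List Nat :=
  List.zipWith (fun sc s => if PySem.Str.isIn wl s then sc + 1 else sc) scores lows

-- the word-major score table: synonym pass, then question-word pass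
def scoresB (question : String) (sentences : List String) (synonyms : List (String × List String)) : List Nat :=
  (PySem.Str.split₀ (PySem.Str.lower question)).foldl
    (fun scores w => bump w (sentences.map PySem.Str.lower) scores)
    (synonyms.foldl (fun scores kv =>
      kv.2.foldl (fun scores w =>
        if PySem.Str.isIn (PySem.Str.lower w) (PySem.Str.lower question)
        then bump (PySem.Str.lower w) (sentences.map PySem.Str.lower) scores else scores) scores)
      (List.replicate sentences.length 0))

def search_answer_alt (question : String) (sentences : List String) (synonyms : List (String × List String)) : Option String :=
  match PySem.List.max? (scoresB question sentences synonyms) (fun x => x) with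
  | none => none        -- 'if not scores: return None' (max would raise on [])
  | some m =>
    if m > 0 then
      match PySem.List.index? (scoresB question sentences synonyms) m with
      | some i => (PySem.List.pyGet? sentences (i : Int)).map PySem.Str.strip
      | none => none    -- unreachable: m is an element of scores
    else none

-- ===== PRECONDITION & SPEC =====
def Spec_search_answer (question : String) (sentences : List String) (synonyms : List (String × List String)) (out : Option String) : Prop := out = search_answer_alt question sentences synonyms
instance (question : String) (sentences : List String) (synonyms : List (String × List String)) (out : Option String) : Decidable (Spec_search_answer question sentences synonyms out) := by unfold Spec_search_answer; infer_instance

-- ===== CLAIM (what is proved, stated in full; the proofs are below) =====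
def Claim_equal_search_answer : Prop := ∀ (question : String) (sentences : List String) (synonyms : List (String × List String)), Dom_search_answer question sentences synonyms → Spec_search_answer question sentences synonyms (search_answer question sentences synonyms)

-- ===== LEMMAS AND PROOFS =====

-- the flat list of lowercased synonym words relevant to the question, duplicates kept
def relevantOf (ql : String) (synonyms : List (String × List String)) : List String :=
  synonyms.flatMap (fun kv => (kv.2.map PySem.Str.lower).filter (fun w => PySem.Str.isIn w ql))

-- the common per-sentence score both programs compute
def cnt (ql : String) (synonyms : List (String × List String)) (sent : String) : Nat :=
  ((relevantOf ql synonyms).filter (fun w => PySem.Str.isIn w (PySem.Str.lower sent))).length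
    + ((PySem.Str.split₀ ql).filter (fun w => PySem.Str.isIn w (PySem.Str.lower sent))).length

-- counting loop = filter length
theorem foldl_count_filter {α : Type} (p : α → Bool) (l : List α) (c : Nat) :
    l.foldl (fun c w => if p w then c + 1 else c) c = c + (l.filter p).length := by
  induction l generalizing c with
  | nil => simp
  | cons h t ih =>
    simp only [List.foldl_cons, List.filter_cons]
    cases hp : p h
    · simp [ih]
    · simp [ih]; omega

-- A's nested synonyms loops count exactly the flat relevant list
theorem nested_count (ql s : String) (synonyms : List (String × List String)) (c : Nat) :
    synonyms.foldl (fun c kv =>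
      kv.2.foldl (fun c word =>
        if PySem.Str.isIn (PySem.Str.lower word) s && PySem.Str.isIn (PySem.Str.lower word) ql
        then c + 1 else c) c) c
    = c + ((relevantOf ql synonyms).filter (fun w => PySem.Str.isIn w s)).length := by
  induction synonyms generalizing c with
  | nil => simp [relevantOf]
  | cons kv t ih =>
    simp only [relevantOf, List.foldl_cons, List.flatMap_cons, List.filter_append,
      List.length_append]
    rw [foldl_count_filter, ih]
    have : (((kv.2.map PySem.Str.lower).filter (fun w => PySem.Str.isIn w ql)).filter
              (fun w => PySem.Str.isIn w s)).length
           = (kv.2.filter (fun word =>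
               PySem.Str.isIn (PySem.Str.lower word) s && PySem.Str.isIn (PySem.Str.lower word) ql)).length := by
      rw [List.filter_filter, List.filter_map, List.length_map]
      simp only [Function.comp_def, Bool.and_comm]
    simp only [relevantOf] at *
    omega

theorem count_eq (ql : String) (synonyms : List (String × List String)) (sentence : String) :
    countA ql synonyms sentence = cnt ql synonyms sentence := by
  unfold countA cnt
  rw [foldl_count_filter, nested_count]
  omega

-- zipWith composed with a second zipWith over the same right list
theorem zipWith_zipWith_right {α β γ δ : Type} (f : γ → β → δ) (g : α → β → γ)
    (a : List α) (b : List β) :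
    List.zipWith f (List.zipWith g a b) b = List.zipWith (fun x y => f (g x y) y) a b := by
  induction a generalizing b with
  | nil => simp
  | cons x a ih => cases b with
    | nil => simp
    | cons y b => simp [ih]

theorem zipWith_self_of_le {α β : Type} (a : List α) (b : List β) (h : a.length ≤ b.length) :
    List.zipWith (fun x _ => x) a b = a := by
  induction a generalizing b with
  | nil => simp
  | cons x a ih => cases b with
    | nil => simp at h
    | cons y b => simp_all

-- folding bump over a word list adds, pointwise, the number of words contained in each sentence
theorem foldl_bump (ws : List String) (lows : List String) (scores : List Nat)
    (h : scores.length ≤ lows.length) :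
    ws.foldl (fun sc w => bump w lows sc) scores
    = List.zipWith (fun sc s => sc + (ws.filter (fun w => PySem.Str.isIn w s)).length) scores lows := by
  induction ws generalizing scores with
  | nil =>
    simp only [List.foldl_nil, List.filter_nil, List.length_nil, Nat.add_zero]
    exact (zipWith_self_of_le scores lows h).symm
  | cons w ws ih =>
    simp only [List.foldl_cons]
    rw [ih (bump w lows scores) (by simp only [bump, List.length_zipWith]; omega)]
    unfold bump
    rw [zipWith_zipWith_right]
    have hfun : (fun (sc : Nat) (s : String) =>
        (if PySem.Str.isIn w s then sc + 1 else sc) + (ws.filter (fun w => PySem.Str.isIn w s)).length)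
      = (fun sc s => sc + ((w :: ws).filter (fun w => PySem.Str.isIn w s)).length) := by
      funext sc s
      simp only [List.filter_cons]
      split_ifs with hw
      · simp; omega
      · simp
    rw [hfun]

-- the nested conditional synonyms fold is the flat bump fold over relevantOf
theorem syn_fold (ql : String) (lows : List String) (synonyms : List (String × List String))
    (scores : List Nat) :
    synonyms.foldl (fun scores kv =>
      kv.2.foldl (fun scores w =>
        if PySem.Str.isIn (PySem.Str.lower w) ql
        then bump (PySem.Str.lower w) lows scores else scores) scores) scores
    = (relevantOf ql synonyms).foldl (fun sc w => bump w lows sc) scores := by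
  induction synonyms generalizing scores with
  | nil => simp [relevantOf]
  | cons kv t ih =>
    rw [show relevantOf ql (kv :: t)
          = ((kv.2.map PySem.Str.lower).filter (fun w => PySem.Str.isIn w ql)) ++ relevantOf ql t
        from rfl, List.foldl_append, List.foldl_cons, ← ih]
    congr 1
    induction kv.2 generalizing scores with
    | nil => simp
    | cons w l ihw =>
      simp only [List.foldl_cons, List.map_cons, List.filter_cons]
      by_cases hw : PySem.Str.isIn (PySem.Str.lower w) ql = true
      · rw [if_pos hw, if_pos hw, List.foldl_cons]
        exact ihw (bump (PySem.Str.lower w) lows scores)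
      · rw [if_neg hw, if_neg hw]
        exact ihw scores

theorem zipWith_replicate {α β : Type} (f : β → α → β) (c : β) (l : List α) :
    List.zipWith f (List.replicate l.length c) l = l.map (f c) := by
  induction l with
  | nil => simp
  | cons x t ih => simp [List.replicate_succ, ih]

theorem foldl_bump_len (lows : List String) (ws : List String) (scores : List Nat) :
    (ws.foldl (fun sc w => bump w lows sc) scores).length ≤ scores.length := by
  induction ws generalizing scores with
  | nil => simp
  | cons w ws ih =>
    simp only [List.foldl_cons]
    exact le_trans (ih _) (by simp only [bump, List.length_zipWith]; omega)

-- the score table is the map of the common per-sentence score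
theorem scores_eq (question : String) (sentences : List String) (synonyms : List (String × List String)) :
    scoresB question sentences synonyms
    = sentences.map (cnt (PySem.Str.lower question) synonyms) := by
  unfold scoresB
  rw [syn_fold, foldl_bump _ _ _
        (le_trans (foldl_bump_len _ _ _) (by simp)),
      foldl_bump _ _ _ (by simp),
      zipWith_zipWith_right]
  have : sentences.length = (sentences.map PySem.Str.lower).length := by simp
  rw [this, zipWith_replicate, List.map_map]
  simp only [Function.comp_def, Nat.zero_add]
  rfl

-- ---- A's running-best fold, generically ----

def foldA {α : Type} (f : α → Nat) (l : List α) (st : α × Nat) : α × Nat :=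
  l.foldl (fun st s => if f s > st.2 then (s, f s) else st) st

theorem foldA_mono {α : Type} (f : α → Nat) (l : List α) (st : α × Nat) :
    st.2 ≤ (foldA f l st).2 := by
  induction l generalizing st with
  | nil => simp [foldA]
  | cons s t ih =>
    simp only [foldA, List.foldl_cons]
    by_cases h : f s > st.2
    · simp only [h, if_pos]
      exact le_trans (le_of_lt h) (ih (s, f s))
    · rw [if_neg h]
      exact ih st

theorem foldA_max {α : Type} (f : α → Nat) (l : List α) (st : α × Nat) :
    (foldA f l st).2 = l.foldl (fun acc s => max acc (f s)) st.2 := by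
  induction l generalizing st with
  | nil => simp [foldA]
  | cons s t ih =>
    simp only [foldA, List.foldl_cons]
    by_cases h : f s > st.2
    · simp only [h, if_pos]
      rw [show max st.2 (f s) = f s by omega]
      exact ih (s, f s)
    · rw [if_neg h]
      rw [show max st.2 (f s) = st.2 by omega]
      exact ih st

theorem foldA_cons {α : Type} (f : α → Nat) (s : α) (t : List α) (st : α × Nat) :
    foldA f (s :: t) st = foldA f t (if f s > st.2 then (s, f s) else st) := by
  simp only [foldA, List.foldl_cons]

theorem foldA_fix {α : Type} (f : α → Nat) (l : List α) (st : α × Nat)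
    (h : (foldA f l st).2 = st.2) : foldA f l st = st := by
  induction l generalizing st with
  | nil => rfl
  | cons u t ih =>
    rw [foldA_cons] at h ⊢
    by_cases hu : f u > st.2
    · exfalso
      rw [if_pos hu] at h
      have hm := foldA_mono f t (u, f u)
      simp only [h] at hm
      omega
    · rw [if_neg hu] at h ⊢
      exact ih st h

-- when the max strictly improves, the winner is the FIRST element attaining the final max
theorem foldA_find {α : Type} (f : α → Nat) (l : List α) (a : α) (m : Nat)
    (h : m < (foldA f l (a, m)).2) :
    l.find? (fun s => f s == (foldA f l (a, m)).2) = some (foldA f l (a, m)).1 := by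
  induction l generalizing a m with
  | nil => simp [foldA] at h
  | cons s t ih =>
    rw [foldA_cons] at h ⊢
    by_cases hs : f s > m
    · rw [if_pos hs] at h ⊢
      by_cases htop : (foldA f t (s, f s)).2 = f s
      · rw [foldA_fix f t (s, f s) htop]
        simp
      · have hle : f s ≤ (foldA f t (s, f s)).2 := foldA_mono f t (s, f s)
        rw [List.find?_cons_of_neg (by simp; omega)]
        exact ih s (f s) (by omega)
    · rw [if_neg hs] at h ⊢
      rw [List.find?_cons_of_neg (by simp; omega)]
      exact ih a m h

-- first index of the max in the score table selects the first element attaining it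
theorem bestA_eq (question : String) (synonyms : List (String × List String)) (sentences : List String) :
    bestA question synonyms sentences
    = foldA (cnt (PySem.Str.lower question) synonyms) sentences ("", 0) := by
  unfold bestA foldA
  have hfun : (fun (st : String × Nat) sentence =>
      if countA (PySem.Str.lower question) synonyms sentence > st.2
      then (sentence, countA (PySem.Str.lower question) synonyms sentence) else st)
    = (fun (st : String × Nat) s =>
      if cnt (PySem.Str.lower question) synonyms s > st.2
      then (s, cnt (PySem.Str.lower question) synonyms s) else st) := by
    funext st s; rw [count_eq]
  rw [hfun]

theorem sel_eq {α : Type} (f : α → Nat) (l : List α) (M : Nat) (hM : M ∈ l.map f) :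
    (PySem.List.index? (l.map f) M).bind (fun i => PySem.List.pyGet? l (i : Int))
    = l.find? (fun s => f s == M) := by
  induction l with
  | nil => simp at hM
  | cons x t ih =>
    by_cases hx : f x = M
    · subst hx
      rw [List.map_cons, PySem.List.index?_cons_self, Option.bind_some,
          show ((0:Nat):Int) = 0 from rfl, PySem.List.pyGet?_zero_cons,
          List.find?_cons_of_pos (by simp)]
    · have hM' : M ∈ t.map f := by
        rw [List.map_cons, List.mem_cons] at hM
        rcases hM with h | h
        · exact absurd h.symm hx
        · exact h
      rw [List.map_cons, PySem.List.index?_cons_of_ne (t.map f) hx,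
          List.find?_cons_of_neg (by simp [hx])]
      rw [← ih hM']
      rcases hidx : PySem.List.index? (t.map f) M with _ | j
      · simp
      · simp only [Option.map_some, Option.bind_some]
        have hc : ((j + 1 : Nat) : Int) = (j : Int) + 1 := by push_cast; ring
        rw [hc, PySem.List.pyGet?_cons_succ]

-- ===== VERDICT (by name: the statement is the Claim_ definition above) =====
theorem search_answer_spec : Claim_equal_search_answer := by
  intro question sentences synonyms _
  unfold Spec_search_answer search_answer search_answer_alt
  rw [scores_eq, bestA_eq]
  set f := cnt (PySem.Str.lower question) synonyms with hf
  cases sentences with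
  | nil => simp [foldA, PySem.List.max?]
  | cons x t =>
    rw [show (x :: t).map f = f x :: t.map f from rfl, PySem.List.max?_id_cons]
    dsimp only
    set M := List.foldl max (f x) (t.map f) with hM
    have hr2 : (foldA f (x :: t) ("", 0)).2 = M := by
      rw [foldA_max]
      simp only [List.foldl_cons, Nat.zero_max]
      rw [hM, List.foldl_map]
    by_cases hpos : M > 0
    · rw [if_pos (by omega : (foldA f (x :: t) ("", 0)).2 > 0), if_pos hpos]
      have hmem : M ∈ (x :: t).map f := by
        rcases PySem.List.foldl_max_mem (t.map f) (f x) with h | h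
        · rw [← hM] at h
          rw [h]; exact List.mem_cons_self
        · exact List.mem_cons_of_mem _ h
      have hfind := foldA_find f (x :: t) "" 0 (by omega)
      rw [hr2] at hfind
      have hsel := sel_eq f (x :: t) M hmem
      rw [hfind] at hsel
      rcases hidx : PySem.List.index? ((x :: t).map f) M with _ | i
      · rw [hidx] at hsel; simp at hsel
      · rw [hidx] at hsel
        simp only [Option.bind_some] at hsel
        rw [List.map_cons] at hidx
        rw [hidx]
        dsimp only
        rw [hsel]
        simp
    · rw [if_neg (by omega : ¬ (foldA f (x :: t) ("", 0)).2 > 0), if_neg hpos]
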